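-- pv_equiv track=rewrite | github.com/Myunwoo/algorithm_study | stack_queue/programmers85909.py | solution
-- ===== SOURCE A (Python) =====
-- def solution(answers):
--     answer = []
--     n1, n2, n3 = 0, 0, 0
--     arr1 = [1, 2, 3, 4, 5]
--     arr2 = [2, 1, 2, 3, 2, 4, 2, 5]
--     arr3 = [3, 3, 1, 1, 2, 2, 4, 4, 5, 5]
--     for i in range(len(answers)):
--         if arr1[i % len(arr1)] == answers[i]:
--             n1 += 1
--         if arr2[i % len(arr2)] == answers[i]:
--             n2 += 1
--         if arr3[i % len(arr3)] == answers[i]: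
--             n3 += 1
--     m = max(n1, n2, n3)
--     temp = [n1, n2, n3]
--     for i in range(3):
--         if temp[i] == m:
--             answer.append(i+1)
--     return answer
-- ===== SOURCE B (Python) =====
-- def solution(answers):
--     # Histogram approach: the three patterns cycle with periods 5, 8, 10, whose
--     # lcm is 40, so a pattern's guess at position i depends only on i % 40.
--     # Build one histogram keyed by (i % 40, answer) in a single pass, then each
--     # pattern's score is just 40 dictionary lookups, independent of len(answers).
--     counts = {}
--     for i, a in enumerate(answers):
--         key = (i % 40, a)
--         counts[key] = counts.get(key, 0) + 1
--     patterns = [[1, 2, 3, 4, 5],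
--                 [2, 1, 2, 3, 2, 4, 2, 5],
--                 [3, 3, 1, 1, 2, 2, 4, 4, 5, 5]]
--     scores = [sum(counts.get((j, p[j % len(p)]), 0) for j in range(40))
--               for p in patterns]
--     best = max(scores)
--     return [k + 1 for k, s in enumerate(scores) if s == best]
-- ===== Notes on version B (the rewrite author's own statement) =====
-- stated objective: alternative
-- what changed: Instead of A's single interleaved pass testing each position against all three cyclic patterns, B builds a histogram keyed by (index mod 40, answer) in one pass (40 = lcm of the pattern periods) and then reads each pattern's score off the histogram with 40 dictionary lookups.
import Mathlib
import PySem

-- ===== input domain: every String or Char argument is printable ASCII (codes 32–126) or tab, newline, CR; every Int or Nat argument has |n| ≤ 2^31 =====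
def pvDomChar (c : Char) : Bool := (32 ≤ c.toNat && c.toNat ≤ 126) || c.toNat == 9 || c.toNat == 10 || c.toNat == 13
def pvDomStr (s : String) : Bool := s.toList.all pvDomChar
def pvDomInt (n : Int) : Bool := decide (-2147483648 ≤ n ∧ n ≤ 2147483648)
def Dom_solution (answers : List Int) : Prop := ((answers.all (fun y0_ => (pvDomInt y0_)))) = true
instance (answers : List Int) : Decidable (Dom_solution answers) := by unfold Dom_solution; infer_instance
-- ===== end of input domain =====

-- B replaces A's interleaved three-counter pass by a different algorithm: one pass builds a
-- histogram keyed by (index mod 40, answer) — 40 = lcm of the pattern periods 5, 8, 10 — and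
-- each pattern's score is then read off with 40 dictionary lookups; same return value.

-- ===== PORT A =====
def solution (answers : List Int) : List Int :=
  let arr1 : List Int := [1, 2, 3, 4, 5]
  let arr2 : List Int := [2, 1, 2, 3, 2, 4, 2, 5]
  let arr3 : List Int := [3, 3, 1, 1, 2, 2, 4, 4, 5, 5]
  -- for i in range(len(answers)): three independent 'if arrk[i % len(arrk)] == answers[i]: nk += 1'
  let ns : Int × Int × Int :=
    (PySem.List.pyRange 0 (answers.length : Int) 1).foldl
      (fun acc i =>
        let acc := if PySem.List.pyGetD arr1 (PySem.Int.mod i (arr1.length : Int)) 0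
                      == PySem.List.pyGetD answers i 0 then (acc.1 + 1, acc.2.1, acc.2.2) else acc
        let acc := if PySem.List.pyGetD arr2 (PySem.Int.mod i (arr2.length : Int)) 0
                      == PySem.List.pyGetD answers i 0 then (acc.1, acc.2.1 + 1, acc.2.2) else acc
        if PySem.List.pyGetD arr3 (PySem.Int.mod i (arr3.length : Int)) 0
                      == PySem.List.pyGetD answers i 0 then (acc.1, acc.2.1, acc.2.2 + 1) else acc)
      (0, 0, 0)
  let n1 := ns.1; let n2 := ns.2.1; let n3 := ns.2.2
  let m := max (max n1 n2) n3            -- max(n1, n2, n3)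
  let temp : List Int := [n1, n2, n3]
  -- for i in range(3): if temp[i] == m: answer.append(i+1)
  (PySem.List.pyRange 0 3 1).foldl
    (fun answer i => if PySem.List.pyGetD temp i 0 == m then answer ++ [i + 1] else answer) []

-- ===== PORT B =====
-- p[j % len(p)], the pattern's guess at position j
def pvPatAt (p : List Int) (j : Int) : Int :=
  PySem.List.pyGetD p (PySem.Int.mod j (p.length : Int)) 0

def solution_alt (answers : List Int) : List Int :=
  -- counts[(i % 40, a)] = counts.get((i % 40, a), 0) + 1, one pass over enumerate(answers)
  let counts : PySem.Dict (Int × Int) Int :=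
    (PySem.List.enumerate answers).foldl
      (fun d q => d.insert (PySem.Int.mod q.1 40, q.2) (d.getD (PySem.Int.mod q.1 40, q.2) 0 + 1))
      PySem.Dict.empty
  let patterns : List (List Int) :=
    [[1, 2, 3, 4, 5], [2, 1, 2, 3, 2, 4, 2, 5], [3, 3, 1, 1, 2, 2, 4, 4, 5, 5]]
  -- sum(counts.get((j, p[j % len(p)]), 0) for j in range(40))
  let scores := patterns.map (fun p =>
    ((PySem.List.pyRange 0 40 1).map (fun j => counts.getD (j, pvPatAt p j) 0)).sum)
  -- max(scores); scores is a non-empty literal list, so the Python max never raises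
  let best := (PySem.List.max? scores (fun s => s)).getD 0
  -- [k + 1 for k, s in enumerate(scores) if s == best]
  ((PySem.List.enumerate scores).filter (fun q => q.2 == best)).map (fun q => q.1 + 1)

-- ===== PRECONDITION & SPEC =====
def Spec_solution (answers : List Int) (out : List Int) : Prop := out = solution_alt answers
instance (answers : List Int) (out : List Int) : Decidable (Spec_solution answers out) := by unfold Spec_solution; infer_instance

-- ===== CLAIM (what is proved, stated in full; the proofs are below) =====
def Claim_equal_solution : Prop := ∀ (answers : List Int), Dom_solution answers → Spec_solution answers (solution answers)

-- ===== LEMMAS AND PROOFS =====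

-- the match count both programs compute, written directly over enumerate(answers)
def pvScore (p : List Int) (answers : List Int) : Int :=
  ((PySem.List.enumerate answers).map
    (fun q => if pvPatAt p q.1 == q.2 then (1 : Int) else 0)).sum

-- indicator summed by pvScore, for a fixed pattern p
def pvInd (p : List Int) (q : Int × Int) : Int :=
  if pvPatAt p q.1 == q.2 then 1 else 0

-- A's interleaved triple-counter step, as a function of the (index, element) pair
def pvStep (acc : Int × Int × Int) (q : Int × Int) : Int × Int × Int :=
  let acc := if pvPatAt [1, 2, 3, 4, 5] q.1 == q.2 then (acc.1 + 1, acc.2.1, acc.2.2) else acc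
  let acc := if pvPatAt [2, 1, 2, 3, 2, 4, 2, 5] q.1 == q.2 then (acc.1, acc.2.1 + 1, acc.2.2) else acc
  if pvPatAt [3, 3, 1, 1, 2, 2, 4, 4, 5, 5] q.1 == q.2 then (acc.1, acc.2.1, acc.2.2 + 1) else acc

-- one interleaved step adds the three indicators componentwise
theorem pvStep_eq (a b c : Int) (q : Int × Int) : pvStep (a, b, c) q =
    (a + pvInd [1, 2, 3, 4, 5] q, b + pvInd [2, 1, 2, 3, 2, 4, 2, 5] q,
     c + pvInd [3, 3, 1, 1, 2, 2, 4, 4, 5, 5] q) := by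
  simp only [pvStep, pvInd]
  split_ifs <;> simp

-- the interleaved fold computes the three independent per-pattern sums
theorem pvStep_foldl (l : List (Int × Int)) (a b c : Int) :
    l.foldl pvStep (a, b, c) =
      (a + (l.map (pvInd [1, 2, 3, 4, 5])).sum,
       b + (l.map (pvInd [2, 1, 2, 3, 2, 4, 2, 5])).sum,
       c + (l.map (pvInd [3, 3, 1, 1, 2, 2, 4, 4, 5, 5])).sum) := by
  induction l generalizing a b c with
  | nil => simp
  | cons q l ih =>
    simp only [List.foldl_cons, List.map_cons, List.sum_cons, pvStep_eq, ih]
    ring_nf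

-- A's index loop equals the three per-pattern scores
theorem pvA_counts (answers : List Int) :
    (PySem.List.pyRange 0 (answers.length : Int) 1).foldl
        (fun acc i => pvStep acc (i, PySem.List.pyGetD answers i 0)) ((0 : Int), (0 : Int), (0 : Int))
      = (pvScore [1, 2, 3, 4, 5] answers,
         pvScore [2, 1, 2, 3, 2, 4, 2, 5] answers,
         pvScore [3, 3, 1, 1, 2, 2, 4, 4, 5, 5] answers) := by
  have h1 : (PySem.List.pyRange 0 (answers.length : Int) 1).foldl
        (fun acc i => pvStep acc (i, PySem.List.pyGetD answers i 0)) ((0 : Int), (0 : Int), (0 : Int))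
        = (PySem.List.enumerate answers).foldl pvStep ((0 : Int), (0 : Int), (0 : Int)) := by
    rw [PySem.List.enumerate_eq_map_pyRange answers 0, List.foldl_map]
    simp [PySem.List.len]
  rw [h1, pvStep_foldl]
  simp only [zero_add]
  rfl

-- summing a point indicator over a duplicate-free list containing r picks out r
theorem pvSum_point (L : List Int) (hnd : L.Nodup) (r v : Int) (hr : r ∈ L) (f : Int → Int) :
    (L.map (fun j => if ((r, v) : Int × Int) == (j, f j) then (1 : Int) else 0)).sum
      = if v = f r then 1 else 0 := by
  induction L with
  | nil => cases hr
  | cons x L ih =>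
    simp only [List.map_cons, List.sum_cons]
    rcases List.mem_cons.1 hr with rfl | hr'
    · have hnotin : r ∉ L := (List.nodup_cons.1 hnd).1
      have hz : (L.map (fun j => if ((r, v) : Int × Int) == (j, f j) then (1 : Int) else 0)).sum = 0 := by
        rw [List.sum_eq_zero]
        intro y hy
        rcases List.mem_map.1 hy with ⟨j, hj, rfl⟩
        have : ¬ (((r, v) : Int × Int) == (j, f j)) = true := by
          simp only [beq_iff_eq, Prod.mk.injEq, not_and]
          intro h; exact absurd (h ▸ hj) hnotin
        simp [this]
      rw [hz]
      simp [Prod.ext_iff]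
    · have hne : r ≠ x := fun h => (List.nodup_cons.1 hnd).1 (h ▸ hr')
      have : (((r, v) : Int × Int) == (x, f x)) = false := by
        simp [Prod.ext_iff, hne]
      rw [this, ih (List.nodup_cons.1 hnd).2 hr']
      simp

-- with the pattern period dividing 40, the guess at j depends only on j mod 40
theorem pvPatAt_mod40 (p : List Int) (hpos : 0 < (p.length : Int))
    (hdvd : (p.length : Int) ∣ 40) (i : Int) :
    pvPatAt p (PySem.Int.mod i 40) = pvPatAt p i := by
  unfold pvPatAt
  congr 1
  rw [PySem.Int.mod_eq_emod_of_pos hpos, PySem.Int.mod_eq_emod_of_pos hpos,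
      PySem.Int.mod_eq_emod_of_pos (show (0:Int) < 40 by norm_num), Int.emod_emod_of_dvd _ hdvd]

-- core: summing the histogram counts at (j, guess j) over j in range(40)
-- equals the direct match count
theorem pvSumCount (p : List Int) (hpos : 0 < (p.length : Int)) (hdvd : (p.length : Int) ∣ 40)
    (l : List (Int × Int)) :
    ((PySem.List.pyRange 0 40 1).map
        (fun j => (((l.map (fun q => (PySem.Int.mod q.1 40, q.2))).count (j, pvPatAt p j) : Nat) : Int))).sum
      = (l.map (pvInd p)).sum := by
  induction l with
  | nil => simp
  | cons q l ih =>
    have hcnt : ∀ j : Int,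
        (((q :: l).map (fun q => (PySem.Int.mod q.1 40, q.2))).count (j, pvPatAt p j))
          = ((l.map (fun q => (PySem.Int.mod q.1 40, q.2))).count (j, pvPatAt p j))
            + (if ((PySem.Int.mod q.1 40, q.2) : Int × Int) == (j, pvPatAt p j) then 1 else 0) := by
      intro j
      simp [List.count_cons]
    have hsplit :
        ((PySem.List.pyRange 0 40 1).map
          (fun j => (((q :: l).map (fun q => (PySem.Int.mod q.1 40, q.2))).count (j, pvPatAt p j) : Int))).sum
        = ((PySem.List.pyRange 0 40 1).map
            (fun j => (((l.map (fun q => (PySem.Int.mod q.1 40, q.2))).count (j, pvPatAt p j) : Nat) : Int))).sum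
          + ((PySem.List.pyRange 0 40 1).map
            (fun j => if ((PySem.Int.mod q.1 40, q.2) : Int × Int) == (j, pvPatAt p j) then (1 : Int) else 0)).sum := by
      rw [show ((PySem.List.pyRange 0 40 1).map
            (fun j => (((q :: l).map (fun q => (PySem.Int.mod q.1 40, q.2))).count (j, pvPatAt p j) : Int)))
          = ((PySem.List.pyRange 0 40 1).map
            (fun j => (((l.map (fun q => (PySem.Int.mod q.1 40, q.2))).count (j, pvPatAt p j) : Nat) : Int)
              + (if ((PySem.Int.mod q.1 40, q.2) : Int × Int) == (j, pvPatAt p j) then (1 : Int) else 0)))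
          from List.map_congr_left (fun j _ => by rw [hcnt j]; push_cast; split_ifs <;> simp)]
      rw [List.sum_map_add]
    rw [hsplit, ih]
    have hr : PySem.Int.mod q.1 40 ∈ PySem.List.pyRange 0 40 1 := by
      rw [PySem.List.mem_pyRange_one]
      exact ⟨PySem.Int.mod_nonneg q.1 (by norm_num), PySem.Int.mod_lt q.1 (by norm_num)⟩
    rw [pvSum_point _ (by decide) _ _ hr]
    rw [pvPatAt_mod40 p hpos hdvd]
    simp only [List.map_cons, List.sum_cons, pvInd]
    have : (if q.2 = pvPatAt p q.1 then (1 : Int) else 0)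
         = (if pvPatAt p q.1 == q.2 then (1 : Int) else 0) := by
      simp only [beq_iff_eq]
      split_ifs with h1 h2 h2 <;> first | rfl | exact absurd h1.symm h2 | exact absurd h2.symm h1
    rw [this]; ring

-- the histogram built by B's loop reads back as a count over the keyed list
theorem pvCounts_getD (answers : List Int) (k : Int × Int) :
    ((PySem.List.enumerate answers).foldl
      (fun d q => d.insert (PySem.Int.mod q.1 40, q.2) (d.getD (PySem.Int.mod q.1 40, q.2) 0 + 1))
      PySem.Dict.empty).getD k 0
    = (((PySem.List.enumerate answers).map (fun q => (PySem.Int.mod q.1 40, q.2))).count k : Int) := by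
  have hfold : ∀ (l : List (Int × Int)) (d : PySem.Dict (Int × Int) Int),
      l.foldl (fun d q => d.insert (PySem.Int.mod q.1 40, q.2) (d.getD (PySem.Int.mod q.1 40, q.2) 0 + 1)) d
        = (l.map (fun q => (PySem.Int.mod q.1 40, q.2))).foldl
            (fun d x => d.insert x (d.getD x 0 + 1)) d := by
    intro l
    induction l with
    | nil => intro d; rfl
    | cons q l ih => intro d; simp only [List.foldl_cons, List.map_cons, ih]
  rw [hfold, PySem.Dict.getD_foldl_insert_add_one]
  simp

-- B's score for a pattern equals the direct match count
theorem pvScoreB_eq (p : List Int) (hpos : 0 < (p.length : Int)) (hdvd : (p.length : Int) ∣ 40)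
    (answers : List Int) :
    ((PySem.List.pyRange 0 40 1).map
        (fun j => ((PySem.List.enumerate answers).foldl
          (fun d q => d.insert (PySem.Int.mod q.1 40, q.2) (d.getD (PySem.Int.mod q.1 40, q.2) 0 + 1))
          PySem.Dict.empty).getD (j, pvPatAt p j) 0)).sum
      = pvScore p answers := by
  have : ∀ j : Int, ((PySem.List.enumerate answers).foldl
          (fun d q => d.insert (PySem.Int.mod q.1 40, q.2) (d.getD (PySem.Int.mod q.1 40, q.2) 0 + 1))
          PySem.Dict.empty).getD (j, pvPatAt p j) 0
        = (((PySem.List.enumerate answers).map (fun q => (PySem.Int.mod q.1 40, q.2))).count (j, pvPatAt p j) : Int) :=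
    fun j => pvCounts_getD answers _
  simp only [this]
  rw [pvSumCount p hpos hdvd]
  rfl

-- Python max over the three-element score list
theorem pvMax?_three (a b c : Int) :
    PySem.List.max? [a, b, c] (fun s => s) = some (max (max a b) c) := by
  simp only [PySem.List.max?, List.foldl]
  by_cases h1 : a < b <;> simp [h1, max_def] <;> split_ifs <;>
    simp only [Option.some.injEq] <;> omega

theorem solution_eq_alt (answers : List Int) : solution answers = solution_alt answers := by
  have h := pvA_counts answers
  -- A, with its counting loop abstracted into pvStep (definitional equality)
  have hA : solution answers =
      (let t := (PySem.List.pyRange 0 (answers.length : Int) 1).foldl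
          (fun acc i => pvStep acc (i, PySem.List.pyGetD answers i 0)) ((0 : Int), (0 : Int), (0 : Int));
       (PySem.List.pyRange 0 3 1).foldl
         (fun answer i => if PySem.List.pyGetD [t.1, t.2.1, t.2.2] i 0 == max (max t.1 t.2.1) t.2.2
                          then answer ++ [i + 1] else answer) []) := rfl
  have hA2 : solution answers =
      (PySem.List.pyRange 0 3 1).foldl
        (fun answer i =>
          if PySem.List.pyGetD
               [pvScore [1, 2, 3, 4, 5] answers, pvScore [2, 1, 2, 3, 2, 4, 2, 5] answers,
                pvScore [3, 3, 1, 1, 2, 2, 4, 4, 5, 5] answers] i 0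
             == max (max (pvScore [1, 2, 3, 4, 5] answers) (pvScore [2, 1, 2, 3, 2, 4, 2, 5] answers))
                  (pvScore [3, 3, 1, 1, 2, 2, 4, 4, 5, 5] answers)
          then answer ++ [i + 1] else answer) [] := by
    rw [hA, h]
  rw [hA2]
  simp only [solution_alt]
  have e1 := pvScoreB_eq [1, 2, 3, 4, 5] (by norm_num) (by decide) answers
  have e2 := pvScoreB_eq [2, 1, 2, 3, 2, 4, 2, 5] (by norm_num) (by decide) answers
  have e3 := pvScoreB_eq [3, 3, 1, 1, 2, 2, 4, 4, 5, 5] (by norm_num) (by decide) answers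
  simp only [List.map_cons, List.map_nil, e1, e2, e3, pvMax?_three, Option.getD_some]
  set s1 := pvScore [1, 2, 3, 4, 5] answers
  set s2 := pvScore [2, 1, 2, 3, 2, 4, 2, 5] answers
  set s3 := pvScore [3, 3, 1, 1, 2, 2, 4, 4, 5, 5] answers
  rw [show PySem.List.pyRange 0 3 1 = [0, 1, 2] from by decide]
  simp only [PySem.List.enumerate_cons, PySem.List.enumerate_nil, List.foldl_cons,
    List.foldl_nil, List.filter, PySem.List.pyGetD_ofNat']
  cases hb1 : (s1 == max (max s1 s2) s3) <;> cases hb2 : (s2 == max (max s1 s2) s3) <;>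
    cases hb3 : (s3 == max (max s1 s2) s3) <;>
    simp only [List.getD_cons_succ, List.getD_cons_zero, hb1, hb2, hb3, List.map_cons,
      List.map_nil, List.nil_append, if_true, if_false, Bool.false_eq_true] <;> norm_num

-- ===== VERDICT (by name: the statement is the Claim_ definition above) =====
theorem solution_spec : Claim_equal_solution := by
  intro answers _
  exact solution_eq_alt answers
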